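-- pv_equiv track=rewrite | github.com/rajan003/Python_Practice | ListTupleSetDic.py | pack_jobs_max_count_first
-- ===== SOURCE A (Python) =====
-- def pack_jobs_max_count_first(jobs, machines):  ## Defining a function arguments machine and jobs
--     # Sort jobs by size ascending to maximize count on a machine
--     remaining_jobs = sorted(jobs.items(), key=lambda kv: kv[1])  # (job, size)  Sorting the jobs as per the second value of each item
--
--     allocation = {m: [] for m in machines}  ### Assigning an empty list to the machine at start
--     leftover = []  ## Emoty list to the Leftover
--
--     for m, limit in machines.items():  ## Accesing the Machine items iwth (m, limit)== name of machine, its limit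
--         used = 0  ## A Variblae names used
--         still_remaining = []  ## Varibal ename still remaining
--
--         for job, size in remaining_jobs:
--             if used + size <= limit:
--                 allocation[m].append((job, size))
--                 used += size
--             else:
--                 still_remaining.append((job, size))
--
--         remaining_jobs = still_remaining
--
--     leftover = remaining_jobs
--     return allocation, leftover
-- ===== SOURCE B (Python) =====
-- def pack_jobs_max_count_first(jobs, machines):
--     # Sort jobs by size ascending once; because sizes are ascending, each machine
--     # greedily consumes a contiguous prefix of what is left, so one forward
--     # pointer suffices: no machine ever re-scans jobs it could not fit.
--     rem = sorted(jobs.items(), key=lambda kv: kv[1])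
--     n = len(rem)
--     i = 0
--     pairs = []
--     for m, limit in machines.items():
--         used = 0
--         chunk = []
--         while i < n and used + rem[i][1] <= limit:
--             chunk.append(rem[i])
--             used += rem[i][1]
--             i += 1
--         pairs.append((m, chunk))
--     return dict(pairs), rem[i:]
-- ===== Notes on version B (the rewrite author's own statement) =====
-- stated objective: faster
-- what changed: A rescans the whole remaining job list for every machine (appending misfits to a new list each pass); B sorts once and, since a machine always accepts exactly a prefix of the ascending-size remainder, advances a single forward pointer over the sorted list, never revisiting skipped jobs.
import Mathlib
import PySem

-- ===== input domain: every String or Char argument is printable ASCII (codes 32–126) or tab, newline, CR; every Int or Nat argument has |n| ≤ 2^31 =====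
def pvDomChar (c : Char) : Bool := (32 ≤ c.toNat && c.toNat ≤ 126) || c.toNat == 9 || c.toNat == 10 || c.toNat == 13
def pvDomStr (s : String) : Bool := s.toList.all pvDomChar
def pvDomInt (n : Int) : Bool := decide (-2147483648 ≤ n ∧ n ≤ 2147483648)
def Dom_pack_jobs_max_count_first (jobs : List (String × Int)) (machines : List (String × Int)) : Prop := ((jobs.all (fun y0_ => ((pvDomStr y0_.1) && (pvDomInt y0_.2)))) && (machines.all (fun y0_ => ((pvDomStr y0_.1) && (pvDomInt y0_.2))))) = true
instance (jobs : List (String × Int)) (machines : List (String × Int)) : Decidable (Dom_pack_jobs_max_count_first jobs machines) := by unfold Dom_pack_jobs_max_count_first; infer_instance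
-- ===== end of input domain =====

-- B replaces A's per-machine rescan of every remaining job (O(n·m)) by a single
-- forward pointer over the once-sorted job list (each machine takes the maximal
-- affordable prefix of what is left), O(n log n + m).

-- ===== PORT A =====
-- inner loop body: for (job, size) in remaining: fit it or keep it
def pvInnerA (m : String) (limit : Int)
    (s : Int × PySem.Dict String (List (String × Int)) × List (String × Int))
    (x : String × Int) :
    Int × PySem.Dict String (List (String × Int)) × List (String × Int) :=
  if s.1 + x.2 ≤ limit then (s.1 + x.2, s.2.1.modify m [] (· ++ [x]), s.2.2)
  else (s.1, s.2.1, s.2.2 ++ [x])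

-- outer loop body: one machine (m, limit) scans all remaining jobs
def pvStepA (st : PySem.Dict String (List (String × Int)) × List (String × Int))
    (p : String × Int) :
    PySem.Dict String (List (String × Int)) × List (String × Int) :=
  let inner := st.2.foldl (pvInnerA p.1 p.2) (0, st.1, [])
  (inner.2.1, inner.2.2)

def pack_jobs_max_count_first (jobs : List (String × Int)) (machines : List (String × Int)) : (List (String × List (String × Int))) × (List (String × Int)) :=
  let remaining0 := PySem.List.sorted jobs (fun kv => kv.2)
  let alloc0 : PySem.Dict String (List (String × Int)) :=
    machines.foldl (fun d p => d.insert p.1 []) PySem.Dict.empty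
  let fin := machines.foldl pvStepA (alloc0, remaining0)
  (fin.1.items, fin.2)

-- ===== PORT B =====
-- the 'while i < n and used + rem[i][1] <= limit' pointer advance, as structural
-- recursion consuming the remaining list: returns (chunk taken, rest)
def pvGreedy (limit : Int) : Int → List (String × Int) → List (String × Int) × List (String × Int)
  | _, [] => ([], [])
  | used, x :: t =>
    if used + x.2 ≤ limit then
      let r := pvGreedy limit (used + x.2) t
      (x :: r.1, r.2)
    else ([], x :: t)

-- outer loop body of B: take the maximal affordable prefix of what is left
def pvStepB (st : List (String × List (String × Int)) × List (String × Int))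
    (p : String × Int) :
    List (String × List (String × Int)) × List (String × Int) :=
  let g := pvGreedy p.2 0 st.2
  (st.1 ++ [(p.1, g.1)], g.2)

def pack_jobs_max_count_first_alt (jobs : List (String × Int)) (machines : List (String × Int)) : (List (String × List (String × Int))) × (List (String × Int)) :=
  let rem0 := PySem.List.sorted jobs (fun kv => kv.2)
  let fin := machines.foldl pvStepB ([], rem0)
  ((PySem.Dict.ofList fin.1).items, fin.2)

-- ===== PRECONDITION & SPEC =====
-- 'machines' is a Python dict, so its keys are necessarily distinct; the association-list
-- encoding also admits duplicate machine names, which no Python call can produce — Pre_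
-- excludes exactly those unrepresentable lists and nothing else.
def Pre_pack_jobs_max_count_first (jobs : List (String × Int)) (machines : List (String × Int)) : Prop :=
  (machines.map Prod.fst).Nodup
instance (jobs : List (String × Int)) (machines : List (String × Int)) : Decidable (Pre_pack_jobs_max_count_first jobs machines) := by unfold Pre_pack_jobs_max_count_first; infer_instance

def pvWitness_pack_jobs_max_count_first : (List (String × Int)) × (List (String × Int)) :=
  ([("a", 2), ("b", 5), ("c", 1)], [("m1", 4), ("m2", 6)])

def Spec_pack_jobs_max_count_first (jobs : List (String × Int)) (machines : List (String × Int)) (out : (List (String × List (String × Int))) × (List (String × Int))) : Prop := out = pack_jobs_max_count_first_alt jobs machines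
instance (jobs : List (String × Int)) (machines : List (String × Int)) (out : (List (String × List (String × Int))) × (List (String × Int))) : Decidable (Spec_pack_jobs_max_count_first jobs machines out) := by unfold Spec_pack_jobs_max_count_first; infer_instance

-- ===== CLAIM (what is proved, stated in full; the proofs are below) =====
def Claim_equal_pack_jobs_max_count_first : Prop := ∀ (jobs : List (String × Int)) (machines : List (String × Int)), Dom_pack_jobs_max_count_first jobs machines → Pre_pack_jobs_max_count_first jobs machines → Spec_pack_jobs_max_count_first jobs machines (pack_jobs_max_count_first jobs machines)

-- ===== LEMMAS AND PROOFS =====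

-- the common abstraction: per machine, the greedy prefix chunk and the leftover
def pvPairs : List (String × Int) → List (String × Int) →
    List (String × List (String × Int)) × List (String × Int)
  | [], rem => ([], rem)
  | p :: ms, rem =>
    let g := pvGreedy p.2 0 rem
    let r := pvPairs ms g.2
    ((p.1, g.1) :: r.1, r.2)

-- all chunks recorded for key k, concatenated in order
def pvAssoc (pairs : List (String × List (String × Int))) (k : String) : List (String × Int) :=
  (pairs.filter (fun q => q.1 == k)).flatMap (·.2)

theorem pvFoldB_eq_pairs (ms : List (String × Int)) :
    ∀ (rem : List (String × Int)) (acc : List (String × List (String × Int))),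
      ms.foldl pvStepB (acc, rem) = (acc ++ (pvPairs ms rem).1, (pvPairs ms rem).2) := by
  induction ms with
  | nil => intro rem acc; simp [pvPairs]
  | cons p ms ih =>
    intro rem acc
    simp only [List.foldl_cons, pvStepB, pvPairs, ih]
    simp

theorem pvGreedy_append (limit : Int) :
    ∀ (rem : List (String × Int)) (used : Int),
      (pvGreedy limit used rem).1 ++ (pvGreedy limit used rem).2 = rem := by
  intro rem
  induction rem with
  | nil => intro used; simp [pvGreedy]
  | cons x t ih =>
    intro used
    by_cases h : used + x.2 ≤ limit
    · simp [pvGreedy, h, ih]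
    · simp [pvGreedy, h]

theorem pvGreedy_rest_pairwise (limit used : Int) (rem : List (String × Int))
    (h : rem.Pairwise (fun a b => a.2 ≤ b.2)) :
    (pvGreedy limit used rem).2.Pairwise (fun a b => a.2 ≤ b.2) := by
  have hsub : (pvGreedy limit used rem).2.Sublist rem := by
    conv_rhs => rw [← pvGreedy_append limit rem used]
    exact List.sublist_append_right _ _
  exact h.sublist hsub

theorem pvInner_none (m : String) (limit : Int) :
    ∀ (t : List (String × Int)) (used : Int)
      (d : PySem.Dict String (List (String × Int))) (acc : List (String × Int)),
      (∀ y ∈ t, ¬ (used + y.2 ≤ limit)) →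
      t.foldl (pvInnerA m limit) (used, d, acc) = (used, d, acc ++ t) := by
  intro t
  induction t with
  | nil => intro used d acc _; simp
  | cons x t ih =>
    intro used d acc h
    have hx : ¬ (used + x.2 ≤ limit) := h x (by simp)
    simp only [List.foldl_cons, pvInnerA, if_neg hx]
    rw [ih used d (acc ++ [x]) (fun y hy => h y (by simp [hy]))]
    simp

theorem pvInner_eq_greedy (m : String) (limit : Int) :
    ∀ (rem : List (String × Int)), rem.Pairwise (fun a b => a.2 ≤ b.2) →
      ∀ (used : Int) (d : PySem.Dict String (List (String × Int))) (acc : List (String × Int)),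
      rem.foldl (pvInnerA m limit) (used, d, acc)
        = (used + ((pvGreedy limit used rem).1.map (·.2)).sum,
           (pvGreedy limit used rem).1.foldl (fun d x => d.modify m [] (· ++ [x])) d,
           acc ++ (pvGreedy limit used rem).2) := by
  intro rem
  induction rem with
  | nil => intro _ used d acc; simp [pvGreedy]
  | cons x t ih =>
    intro h used d acc
    by_cases hx : used + x.2 ≤ limit
    · simp only [List.foldl_cons, pvInnerA, if_pos hx]
      rw [ih (List.Pairwise.of_cons h) (used + x.2) (d.modify m [] (· ++ [x])) acc]
      simp [pvGreedy, hx]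
      ring
    · simp only [List.foldl_cons, pvInnerA, if_neg hx]
      have hall : ∀ y ∈ t, ¬ (used + y.2 ≤ limit) := by
        intro y hy
        have hxy : x.2 ≤ y.2 := (List.pairwise_cons.mp h).1 y hy
        omega
      rw [pvInner_none m limit t used d (acc ++ [x]) hall]
      simp [pvGreedy, hx]

-- repeated modify-append at a fixed key, the three facts needed
theorem pvChunk_getD_self (m : String) :
    ∀ (c : List (String × Int)) (d : PySem.Dict String (List (String × Int))),
      (c.foldl (fun d x => d.modify m [] (· ++ [x])) d).getD m [] = d.getD m [] ++ c := by
  intro c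
  induction c with
  | nil => intro d; simp
  | cons x t ih =>
    intro d
    simp only [List.foldl_cons]
    rw [ih, PySem.Dict.getD_modify_self]
    simp

theorem pvChunk_getD_ne (m k : String) (hk : k ≠ m) :
    ∀ (c : List (String × Int)) (d : PySem.Dict String (List (String × Int))),
      (c.foldl (fun d x => d.modify m [] (· ++ [x])) d).getD k [] = d.getD k [] := by
  intro c
  induction c with
  | nil => intro d; simp
  | cons x t ih =>
    intro d
    simp only [List.foldl_cons]
    rw [ih, PySem.Dict.getD_modify_of_ne _ _ _ hk]

theorem pvKeys_insert_of_contains {ν : Type} (d : PySem.Dict String ν) (k : String) (v : ν)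
    (h : d.contains k = true) : (d.insert k v).keys = d.keys := by
  simp only [PySem.Dict.keys, PySem.Dict.items_insert_of_contains d v h, List.map_map]
  apply List.map_congr_left
  intro p _
  by_cases hp : p.1 = k
  · simp [hp]
  · simp [hp]

theorem pvChunk_keys (m : String) :
    ∀ (c : List (String × Int)) (d : PySem.Dict String (List (String × Int))),
      d.contains m = true →
      (c.foldl (fun d x => d.modify m [] (· ++ [x])) d).keys = d.keys := by
  intro c
  induction c with
  | nil => intro d _; simp
  | cons x t ih =>
    intro d h
    simp only [List.foldl_cons]
    have hk1 : (d.modify m [] (· ++ [x])).keys = d.keys := by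
      rw [PySem.Dict.keys_modify, pvKeys_insert_of_contains _ _ _ h]
    have hc : (d.modify m [] (· ++ [x])).contains m = true := by
      rw [PySem.Dict.contains_eq_decide_mem_keys, hk1,
        ← PySem.Dict.contains_eq_decide_mem_keys]
      exact h
    rw [ih _ hc, hk1]

theorem pvAssoc_cons (p : String × List (String × Int)) (t : List (String × List (String × Int)))
    (k : String) :
    pvAssoc (p :: t) k = (if p.1 = k then p.2 else []) ++ pvAssoc t k := by
  by_cases h : p.1 = k
  · simp [pvAssoc, h]
  · simp [pvAssoc, h]

-- main outer induction: A's machine loop tracked against pvPairs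
theorem pvOuter (ms : List (String × Int)) :
    ∀ (d : PySem.Dict String (List (String × Int))) (rem : List (String × Int)),
      rem.Pairwise (fun a b => a.2 ≤ b.2) →
      (∀ p ∈ ms, d.contains p.1 = true) →
      (ms.foldl pvStepA (d, rem)).2 = (pvPairs ms rem).2 ∧
      (ms.foldl pvStepA (d, rem)).1.keys = d.keys ∧
      (∀ k, (ms.foldl pvStepA (d, rem)).1.getD k [] = d.getD k [] ++ pvAssoc (pvPairs ms rem).1 k) := by
  induction ms with
  | nil => intro d rem _ _; simp [pvPairs, pvAssoc]
  | cons p ms ih =>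
    intro d rem hrem hcont
    have hstep : pvStepA (d, rem) p =
        ((pvGreedy p.2 0 rem).1.foldl (fun d x => d.modify p.1 [] (· ++ [x])) d,
         (pvGreedy p.2 0 rem).2) := by
      show (let inner := rem.foldl (pvInnerA p.1 p.2) (0, d, []); (inner.2.1, inner.2.2)) = _
      rw [pvInner_eq_greedy p.1 p.2 rem hrem 0 d []]
      simp
    have hcontp : d.contains p.1 = true := hcont p (by simp)
    have hkeys' : ((pvGreedy p.2 0 rem).1.foldl (fun d x => d.modify p.1 [] (· ++ [x])) d).keys = d.keys :=
      pvChunk_keys p.1 (pvGreedy p.2 0 rem).1 d hcontp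
    have hrem' : (pvGreedy p.2 0 rem).2.Pairwise (fun a b => a.2 ≤ b.2) :=
      pvGreedy_rest_pairwise p.2 0 rem hrem
    have hcont' : ∀ q ∈ ms,
        ((pvGreedy p.2 0 rem).1.foldl (fun d x => d.modify p.1 [] (· ++ [x])) d).contains q.1 = true := by
      intro q hq
      rw [PySem.Dict.contains_eq_decide_mem_keys, hkeys',
        ← PySem.Dict.contains_eq_decide_mem_keys]
      exact hcont q (by simp [hq])
    obtain ⟨h1, h2, h3⟩ := ih _ (pvGreedy p.2 0 rem).2 hrem' hcont'
    have hp : pvPairs (p :: ms) rem =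
        ((p.1, (pvGreedy p.2 0 rem).1) :: (pvPairs ms (pvGreedy p.2 0 rem).2).1,
         (pvPairs ms (pvGreedy p.2 0 rem).2).2) := by
      simp [pvPairs]
    simp only [List.foldl_cons, hstep]
    refine ⟨by rw [h1, hp], by rw [h2, hkeys'], ?_⟩
    intro k
    rw [h3 k, hp]
    have hd' : ((pvGreedy p.2 0 rem).1.foldl (fun d x => d.modify p.1 [] (· ++ [x])) d).getD k []
        = d.getD k [] ++ (if p.1 = k then (pvGreedy p.2 0 rem).1 else []) := by
      by_cases hk : k = p.1
      · subst hk; rw [pvChunk_getD_self]; simp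
      · rw [pvChunk_getD_ne p.1 k hk, if_neg (fun h => hk h.symm)]; simp
    rw [hd', pvAssoc_cons]
    simp [List.append_assoc]

theorem pvAssoc_eq_nil_of_not_mem (t : List (String × List (String × Int))) (k : String)
    (h : k ∉ t.map Prod.fst) : pvAssoc t k = [] := by
  have : t.filter (fun q => q.1 == k) = [] := by
    rw [List.filter_eq_nil_iff]
    intro q hq
    simp only [beq_iff_eq]
    intro hqk
    exact h (List.mem_map.mpr ⟨q, hq, hqk⟩)
  simp [pvAssoc, this]

theorem pvPairs_keys (ms : List (String × Int)) :
    ∀ rem, (pvPairs ms rem).1.map Prod.fst = ms.map Prod.fst := by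
  induction ms with
  | nil => intro rem; simp [pvPairs]
  | cons p ms ih => intro rem; simp [pvPairs, ih]

theorem pvPairs_self (pairs : List (String × List (String × Int)))
    (hnd : (pairs.map Prod.fst).Nodup) :
    (pairs.map Prod.fst).map (fun k => (k, pvAssoc pairs k)) = pairs := by
  induction pairs with
  | nil => rfl
  | cons p t ih =>
    simp only [List.map_cons, List.nodup_cons] at hnd ⊢
    have hmemp : p.1 ∉ t.map Prod.fst := hnd.1
    have hhead : (p.1, pvAssoc (p :: t) p.1) = p := by
      rw [pvAssoc_cons, if_pos rfl, pvAssoc_eq_nil_of_not_mem t p.1 hmemp]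
      simp
    have htail : List.map (fun k => (k, pvAssoc (p :: t) k)) (List.map Prod.fst t) = t := by
      have h0 : List.map (fun k => (k, pvAssoc (p :: t) k)) (List.map Prod.fst t)
          = List.map (fun k => (k, pvAssoc t k)) (List.map Prod.fst t) := by
        apply List.map_congr_left
        intro k hk
        rw [pvAssoc_cons, if_neg (by intro h; exact hmemp (h ▸ hk))]
        simp
      rw [h0, ih hnd.2]
    rw [hhead, htail]

-- ===== VERDICT (by name: the statement is the Claim_ definition above) =====
theorem pack_jobs_max_count_first_spec : Claim_equal_pack_jobs_max_count_first := by
  intro jobs machines _ hnd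
  unfold Pre_pack_jobs_max_count_first at hnd
  unfold Spec_pack_jobs_max_count_first pack_jobs_max_count_first pack_jobs_max_count_first_alt
  dsimp only
  have hpw : (PySem.List.sorted jobs (fun kv => kv.2)).Pairwise (fun a b => a.2 ≤ b.2) :=
    PySem.List.sorted_pairwise jobs (fun kv => kv.2)
  -- the initial allocation dict: items are (m, []) in machines order
  have hitems0 :
      (machines.foldl (fun d p => d.insert p.1 []) (PySem.Dict.empty : PySem.Dict String (List (String × Int)))).items
        = machines.map (fun p => (p.1, [])) := by
    have := PySem.Dict.items_foldl_insert_fresh machines (fun p => p.1)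
      (fun _ => ([] : List (String × Int))) PySem.Dict.empty
      (fun a _ => PySem.Dict.contains_empty a.1) hnd
    simpa using this
  have hkeys0 :
      (machines.foldl (fun d p => d.insert p.1 []) (PySem.Dict.empty : PySem.Dict String (List (String × Int)))).keys
        = machines.map Prod.fst := by
    show _root_.List.map Prod.fst _ = _
    rw [hitems0, List.map_map]
    rfl
  have hcont0 : ∀ p ∈ machines,
      (machines.foldl (fun d p => d.insert p.1 []) (PySem.Dict.empty : PySem.Dict String (List (String × Int)))).contains p.1 = true := by
    intro p hp
    rw [PySem.Dict.contains_eq_decide_mem_keys, hkeys0]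
    simp only [decide_eq_true_eq]
    exact List.mem_map.mpr ⟨p, hp, rfl⟩
  obtain ⟨h1, h2, h3⟩ := pvOuter machines _ (PySem.List.sorted jobs (fun kv => kv.2)) hpw hcont0
  rw [pvFoldB_eq_pairs machines (PySem.List.sorted jobs (fun kv => kv.2)) []]
  simp only [List.nil_append]
  have hgetD0 : ∀ k ∈ machines.map Prod.fst,
      (machines.foldl (fun d p => d.insert p.1 []) (PySem.Dict.empty : PySem.Dict String (List (String × Int)))).getD k [] = [] := by
    intro k hk
    obtain ⟨p, hp, rfl⟩ := List.mem_map.mp hk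
    apply PySem.Dict.getD_of_mem_items
    · rw [hitems0]
      exact List.mem_map.mpr ⟨p, hp, rfl⟩
    · rw [hkeys0]; exact hnd
  -- A-side allocation items
  have hkeysF := h2.trans hkeys0
  have hndF : (machines.foldl pvStepA
      (machines.foldl (fun d p => d.insert p.1 []) PySem.Dict.empty,
        PySem.List.sorted jobs (fun kv => kv.2))).1.keys.Nodup := by
    rw [hkeysF]; exact hnd
  have hitemsA := PySem.Dict.items_eq_map_keys _ hndF ([] : List (String × Int))
  rw [hitemsA, hkeysF]
  have hmapA : (machines.map Prod.fst).map
      (fun k => (k, (machines.foldl pvStepA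
        (machines.foldl (fun d p => d.insert p.1 []) PySem.Dict.empty,
          PySem.List.sorted jobs (fun kv => kv.2))).1.getD k []))
      = (machines.map Prod.fst).map
        (fun k => (k, pvAssoc (pvPairs machines (PySem.List.sorted jobs (fun kv => kv.2))).1 k)) := by
    apply List.map_congr_left
    intro k hk
    rw [h3 k, hgetD0 k hk]
    simp
  rw [hmapA]
  -- B-side dict-of-pairs items
  have hpk : (pvPairs machines (PySem.List.sorted jobs (fun kv => kv.2))).1.map Prod.fst
      = machines.map Prod.fst := pvPairs_keys machines _
  have hndP : ((pvPairs machines (PySem.List.sorted jobs (fun kv => kv.2))).1.map Prod.fst).Nodup := by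
    rw [hpk]; exact hnd
  have hitemsB :
      (PySem.Dict.ofList (pvPairs machines (PySem.List.sorted jobs (fun kv => kv.2))).1).items
        = (pvPairs machines (PySem.List.sorted jobs (fun kv => kv.2))).1 := by
    have := PySem.Dict.items_foldl_insert_fresh
      (pvPairs machines (PySem.List.sorted jobs (fun kv => kv.2))).1
      (fun a => a.1) (fun a => a.2) PySem.Dict.empty
      (fun a _ => PySem.Dict.contains_empty a.1) hndP
    simpa using this
  rw [hitemsB, ← hpk,
    pvPairs_self (pvPairs machines (PySem.List.sorted jobs (fun kv => kv.2))).1 hndP, h1]
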